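-- pv_equiv track=rewrite | github.com/darrenjedwards/spdp-observer-p-vs-np | spdp_backend.py | _shifts_up_to_degree
-- ===== SOURCE A (Python) =====
-- import itertools
-- from typing import Dict, Any, Tuple, List
--
-- def _shifts_up_to_degree(n_vars: int, ell: int) -> List[int]:
--     """Shift monomials (bitmasks) of degree <= ell in Boolean/multilinear ring."""
--     shifts: List[int] = [0]
--     for d in range(1, ell + 1):
--         for comb in itertools.combinations(range(n_vars), d):
--             mask = 0
--             for i in comb:
--                 mask |= 1 << i
--             shifts.append(mask)
--     return shifts
-- ===== SOURCE B (Python) =====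
-- def _shifts_up_to_degree(n_vars: int, ell: int):
--     """Shift monomials (bitmasks) of degree <= ell, built layer by layer:
--     each degree-d layer is made by extending every degree-(d-1) mask with one
--     index strictly above its highest set index; no itertools, no recursion."""
--     shifts = [0]
--     layer = [(0, -1)]  # (mask, highest index used so far)
--     for _ in range(1, ell + 1):
--         nxt = []
--         for mask, top in layer:
--             for i in range(top + 1, n_vars):
--                 nxt.append((mask | (1 << i), i))
--         shifts += [m for m, _ in nxt]
--         layer = nxt
--     return shifts
-- ===== Notes on version B (the rewrite author's own statement) =====
-- stated objective: alternative
-- what changed: Replaces the per-degree itertools.combinations enumeration (rebuilding each mask with an inner OR loop) by an iterative layer-by-layer construction: the degree-d layer of (mask, top-index) pairs is produced by extending each degree-(d-1) mask with one index above its top, reusing the previous degree's masks.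
import Mathlib
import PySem

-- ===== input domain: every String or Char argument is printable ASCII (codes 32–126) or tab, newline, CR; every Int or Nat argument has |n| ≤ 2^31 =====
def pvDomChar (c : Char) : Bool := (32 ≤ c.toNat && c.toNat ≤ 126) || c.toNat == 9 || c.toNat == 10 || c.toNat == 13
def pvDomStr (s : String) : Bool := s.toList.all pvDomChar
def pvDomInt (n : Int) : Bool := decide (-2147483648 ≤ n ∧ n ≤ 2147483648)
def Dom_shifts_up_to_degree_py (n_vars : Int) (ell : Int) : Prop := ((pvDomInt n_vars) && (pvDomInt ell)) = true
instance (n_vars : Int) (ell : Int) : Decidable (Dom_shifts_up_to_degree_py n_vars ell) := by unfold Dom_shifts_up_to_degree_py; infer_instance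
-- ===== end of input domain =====

-- B replaces the per-degree itertools.combinations enumeration (each mask rebuilt by an inner
-- OR loop) by an iterative layer-by-layer construction reusing the previous degree's masks
-- ("alternative": same total cost up to the per-mask factor, different algorithm).

-- ===== PORT A =====
-- 1 << i  (i here is always a nonnegative range index)
def pvBit (i : Int) : Int := (1 : Int) <<< i.toNat

-- itertools.combinations(range(n_vars), d) in lexicographic order (the standard recursion)
def pvComb (k : Nat) (xs : List Int) : List (List Int) :=
  match k, xs with
  | 0, _ => [[]]
  | _ + 1, [] => []
  | k + 1, x :: rest => (pvComb k rest).map (x :: ·) ++ pvComb (k + 1) rest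

def shifts_up_to_degree_py (n_vars : Int) (ell : Int) : List Int :=
  (PySem.List.pyRange 1 (ell + 1) 1).foldl
    (fun shifts d =>
      (pvComb d.toNat (PySem.List.pyRange 0 n_vars 1)).foldl
        (fun shifts comb =>
          shifts ++ [comb.foldl (fun mask i => PySem.Int.bor mask (pvBit i)) 0])
        shifts)
    [0]

-- ===== PORT B =====
-- layer-by-layer: state = (shifts so far, current layer of (mask, top index) pairs);
-- each degree step extends every pair by each index i in range(top+1, n_vars).
def shifts_up_to_degree_py_alt (n_vars : Int) (ell : Int) : List Int :=
  ((PySem.List.pyRange 1 (ell + 1) 1).foldl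
    (fun st _d =>
      let nxt : List (Int × Int) :=
        st.2.foldl
          (fun nxt p =>
            (PySem.List.pyRange (p.2 + 1) n_vars 1).foldl
              (fun nxt i => nxt ++ [(PySem.Int.bor p.1 (pvBit i), i)]) nxt)
          []
      (st.1 ++ nxt.map Prod.fst, nxt))
    ([0], [((0 : Int), (-1 : Int))])).1

-- ===== PRECONDITION & SPEC =====
def Spec_shifts_up_to_degree_py (n_vars : Int) (ell : Int) (out : List Int) : Prop := out = shifts_up_to_degree_py_alt n_vars ell
instance (n_vars : Int) (ell : Int) (out : List Int) : Decidable (Spec_shifts_up_to_degree_py n_vars ell out) := by unfold Spec_shifts_up_to_degree_py; infer_instance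

-- ===== CLAIM (what is proved, stated in full; the proofs are below) =====
def Claim_equal_shifts_up_to_degree_py : Prop := ∀ (n_vars : Int) (ell : Int), Dom_shifts_up_to_degree_py n_vars ell → Spec_shifts_up_to_degree_py n_vars ell (shifts_up_to_degree_py n_vars ell)

-- ===== LEMMAS AND PROOFS =====

-- the mask of a combination (A's inner OR loop), and its top index (-1 for the empty one)
def pvMask (c : List Int) : Int := c.foldl (fun m i => PySem.Int.bor m (pvBit i)) 0
def pvTop (c : List Int) : Int := c.getLastD (-1)

-- B's layer after d degree steps, expressed through A's combination list
def pvLayer (n : Int) (d : Nat) : List (Int × Int) :=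
  (pvComb d (PySem.List.pyRange 0 n 1)).map (fun c => (pvMask c, pvTop c))

theorem pvComb_one (xs : List Int) : pvComb 1 xs = xs.map (fun x => [x]) := by
  induction xs with
  | nil => rfl
  | cons x rest ih => simp [pvComb, ih]

theorem mem_pvComb_ne_nil (k : Nat) (xs : List Int) (c : List Int)
    (h : c ∈ pvComb (k + 1) xs) : c ≠ [] := by
  induction xs generalizing k c with
  | nil => simp [pvComb] at h
  | cons x rest ih =>
    simp only [pvComb, List.mem_append, List.mem_map] at h
    rcases h with ⟨c', _, rfl⟩ | h
    · simp
    · exact ih k c h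

theorem flatMap_congr_mem {α β : Type} (l : List α) (f g : α → List β)
    (h : ∀ x ∈ l, f x = g x) : l.flatMap f = l.flatMap g := by
  induction l with
  | nil => rfl
  | cons x xs ih => simp only [List.flatMap_cons, h x (by simp), ih (fun y hy => h y (by simp [hy]))]

-- extending every k-combination of range(a, n) by each index above its last element,
-- in lexicographic order of the k-combinations, yields the (k+1)-combinations in order
theorem pvComb_succ_flatMap (k : Nat) (a n : Int) :
    pvComb (k + 1) (PySem.List.pyRange a n 1) =
      (pvComb k (PySem.List.pyRange a n 1)).flatMap
        (fun c => (PySem.List.pyRange (c.getLastD (a - 1) + 1) n 1).map (fun i => c ++ [i])) := by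
  by_cases hab : a < n
  · rw [PySem.List.pyRange_one_cons hab]
    cases k with
    | zero =>
      simp only [pvComb, List.flatMap_cons, List.flatMap_nil, List.append_nil,
        List.getLastD_nil, List.nil_append]
      rw [show a - 1 + 1 = a from by omega, PySem.List.pyRange_one_cons hab]
      simp [pvComb_one]
    | succ k' =>
      have hm : (n - (a + 1)).toNat < (n - a).toNat := by omega
      have IH1 := pvComb_succ_flatMap k' (a + 1) n
      have IH2 := pvComb_succ_flatMap (k' + 1) (a + 1) n
      rw [show a + 1 - 1 = a from by omega] at IH1 IH2
      simp only [pvComb, List.flatMap_append]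
      rw [List.flatMap_map]
      rw [flatMap_congr_mem _ _
        (fun c' => ((PySem.List.pyRange (c'.getLastD a + 1) n 1).map
          (fun i => c' ++ [i])).map (a :: ·))
        (by
          intro c' _
          rw [List.getLastD_cons]
          simp only [List.map_map, Function.comp_def, List.cons_append])]
      rw [← List.map_flatMap, ← IH1]
      rw [flatMap_congr_mem _ _
        (fun c => (PySem.List.pyRange (c.getLastD a + 1) n 1).map (fun i => c ++ [i]))
        (by
          intro c hc
          have hne := mem_pvComb_ne_nil k' _ c hc
          cases c with
          | nil => exact absurd rfl hne
          | cons y ys => simp only [List.getLastD_cons])]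
      rw [← IH2]
  · rw [PySem.List.pyRange_one_eq_nil (by omega : n ≤ a)]
    cases k with
    | zero =>
      simp only [pvComb, List.flatMap_cons, List.flatMap_nil, List.append_nil,
        List.getLastD_nil, List.nil_append]
      rw [show a - 1 + 1 = a from by omega]
      simp [PySem.List.pyRange_one_eq_nil (show n ≤ a by omega)]
    | succ k' => simp [pvComb]
termination_by (n - a).toNat
decreasing_by all_goals omega

-- one degree step of B maps the layer for degree d to the layer for degree d+1
theorem pvLayer_step (n : Int) (d : Nat) :
    (pvLayer n d).flatMap
        (fun p => (PySem.List.pyRange (p.2 + 1) n 1).map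
          (fun i => (PySem.Int.bor p.1 (pvBit i), i))) = pvLayer n (d + 1) := by
  have h := pvComb_succ_flatMap d 0 n
  rw [show (0 : Int) - 1 = -1 from by norm_num] at h
  unfold pvLayer
  rw [h, List.map_flatMap, List.flatMap_map]
  apply flatMap_congr_mem
  intro c _
  rw [List.map_map]
  apply List.map_congr_left
  intro i _
  simp [pvMask, pvTop, List.foldl_append]

-- B's inner double loop computes exactly that flatMap
theorem inner_fold_eq_flatMap (n : Int) (layer : List (Int × Int)) :
    layer.foldl
      (fun nxt p =>
        (PySem.List.pyRange (p.2 + 1) n 1).foldl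
          (fun nxt i => nxt ++ [(PySem.Int.bor p.1 (pvBit i), i)]) nxt)
      [] =
    layer.flatMap
      (fun p => (PySem.List.pyRange (p.2 + 1) n 1).map
        (fun i => (PySem.Int.bor p.1 (pvBit i), i))) := by
  have h : layer.foldl
      (fun nxt p =>
        (PySem.List.pyRange (p.2 + 1) n 1).foldl
          (fun nxt i => nxt ++ [(PySem.Int.bor p.1 (pvBit i), i)]) nxt)
      [] = [] ++ layer.flatMap
      (fun p => (PySem.List.pyRange (p.2 + 1) n 1).map
        (fun i => (PySem.Int.bor p.1 (pvBit i), i))) := by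
    rw [← PySem.List.foldl_append_eq_flatMap]
    apply PySem.List.foldl_congr_mem
    intro acc' p _
    rw [PySem.List.foldl_append_singleton_eq_map]
  simpa using h

-- the degrees iterated over: range(1, ell+1) = [1, …, ell] as 1 + k for k < ell.toNat
theorem degrees_eq (ell : Int) :
    PySem.List.pyRange 1 (ell + 1) 1 =
      (List.range ell.toNat).map (fun k : Nat => (1 : Int) + (k : Int)) := by
  rw [PySem.List.pyRange_one]
  congr 2
  omega

-- A's fold over the first L degrees, characterised
theorem A_char (n : Int) (L : Nat) :
    ((List.range L).map (fun k : Nat => (1 : Int) + (k : Int))).foldl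
      (fun shifts d =>
        (pvComb d.toNat (PySem.List.pyRange 0 n 1)).foldl
          (fun shifts comb => shifts ++ [pvMask comb]) shifts)
      [0] =
    [0] ++ (List.range L).flatMap
      (fun j => (pvComb (j + 1) (PySem.List.pyRange 0 n 1)).map pvMask) := by
  induction L with
  | zero => simp
  | succ L ih =>
    rw [List.range_succ, List.map_append, List.foldl_append, ih, List.flatMap_append]
    simp only [List.map_cons, List.map_nil, List.foldl_cons, List.foldl_nil,
      List.flatMap_cons, List.flatMap_nil, List.append_nil]
    rw [PySem.List.foldl_append_singleton_eq_map,
      show ((1 : Int) + (L : Int)).toNat = L + 1 from by omega,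
      List.append_assoc]

-- B's fold over the first L degrees, characterised (result and final layer)
theorem B_char (n : Int) (L : Nat) :
    ((List.range L).map (fun k : Nat => (1 : Int) + (k : Int))).foldl
      (fun st (_d : Int) =>
        let nxt : List (Int × Int) :=
          st.2.foldl
            (fun nxt p =>
              (PySem.List.pyRange (p.2 + 1) n 1).foldl
                (fun nxt i => nxt ++ [(PySem.Int.bor p.1 (pvBit i), i)]) nxt)
            []
        (st.1 ++ nxt.map Prod.fst, nxt))
      ([0], [((0 : Int), (-1 : Int))]) =
    ([0] ++ (List.range L).flatMap
      (fun j => (pvComb (j + 1) (PySem.List.pyRange 0 n 1)).map pvMask),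
     pvLayer n L) := by
  induction L with
  | zero => simp [pvLayer, pvComb, pvMask, pvTop]
  | succ L ih =>
    rw [List.range_succ, List.map_append, List.foldl_append, ih, List.flatMap_append]
    simp only [List.map_cons, List.map_nil, List.foldl_cons, List.foldl_nil,
      List.flatMap_cons, List.flatMap_nil, List.append_nil]
    rw [inner_fold_eq_flatMap, pvLayer_step]
    simp only [Prod.mk.injEq]
    refine ⟨?_, trivial⟩
    rw [List.append_assoc]
    congr 1
    congr 1
    unfold pvLayer
    rw [List.map_map]
    rfl

-- ===== VERDICT (by name: the statement is the Claim_ definition above) =====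
theorem shifts_up_to_degree_py_spec : Claim_equal_shifts_up_to_degree_py := by
  intro n ell _
  unfold Spec_shifts_up_to_degree_py shifts_up_to_degree_py shifts_up_to_degree_py_alt
  rw [degrees_eq]
  have hA := A_char n ell.toNat
  have hB := B_char n ell.toNat
  simp only [pvMask] at hA hB
  rw [hA, hB]
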